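-- pv_equiv track=rewrite | github.com/spelunky-fyi/modlunky2 | src/modlunky2/ui/levels/shared/biomes.py | get_biome_for_level
-- ===== SOURCE A (Python) =====
-- class BIOME:
--     DWELLING = "cave"
--     JUNGLE = "jungle"
--     VOLCANA = "volcano"
--     OLMEC = "olmec"
--     TEMPLE = "temple"
--     TIDE_POOL = "tidepool"
--     ICE_CAVES = "ice"
--     NEO_BABYLON = "babylon"
--     SUNKEN_CITY = "sunken"
--     BEEHIVE = "beehive"
--     CITY_OF_GOLD = "gold"
--     DUAT = "duat"
--     EGGPLANT_WORLD = "eggplant"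
--     SURFACE = "surface"
--
-- def get_biome_for_level(
--     lvl,
-- ):  # cave by default, depicts what background and sprites will be loaded
--     if (
--         lvl.startswith("challenge_sun")
--         or lvl.startswith("sunken")
--         or lvl.startswith("hundun")
--         or lvl.startswith("ending_hard")
--         or lvl.endswith("_sunkencity.lvl")
--     ):
--         return BIOME.SUNKEN_CITY
--     elif (
--         lvl.startswith("abzu.lvl")
--         or lvl.startswith("lake")
--         or lvl.startswith("tide")
--         or lvl.startswith("end")
--         or lvl.endswith("_tidepool.lvl")
--     ):
--         return BIOME.TIDE_POOL
--     elif (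
--         lvl.startswith("babylon")
--         or lvl.startswith("hallofu")
--         or lvl.endswith("_babylon.lvl")
--         or lvl.startswith("palace")
--         or lvl.startswith("tiamat")
--     ):
--         return BIOME.NEO_BABYLON
--     elif lvl.startswith("basecamp"):
--         return BIOME.DWELLING
--     elif lvl.startswith("beehive"):
--         return BIOME.BEEHIVE
--     elif (
--         lvl.startswith("blackmark")
--         or lvl.startswith("jungle")
--         or lvl.startswith("challenge_moon")
--         or lvl.endswith("_jungle.lvl")
--     ):
--         return BIOME.JUNGLE
--     elif (
--         lvl.startswith("challenge_star")
--         or lvl.startswith("temple")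
--         or lvl.endswith("_temple.lvl")
--     ):
--         return BIOME.TEMPLE
--     elif lvl.startswith("city"):
--         return BIOME.CITY_OF_GOLD
--     elif lvl.startswith("duat"):
--         return BIOME.DUAT
--     elif lvl.startswith("egg"):
--         return BIOME.EGGPLANT_WORLD
--     elif lvl.startswith("ice") or lvl.endswith("_icecavesarea.lvl"):
--         return BIOME.ICE_CAVES
--     elif lvl.startswith("olmec"):
--         return BIOME.OLMEC
--     elif lvl.startswith("vlad"):
--         return BIOME.VOLCANA
--     elif lvl.startswith("volcano") or lvl.endswith("_volcano.lvl"):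
--         return BIOME.VOLCANA
--
--     dm_themes = [
--         BIOME.DWELLING,
--         BIOME.JUNGLE,
--         BIOME.VOLCANA,
--         BIOME.TIDE_POOL,
--         BIOME.TEMPLE,
--         BIOME.ICE_CAVES,
--         BIOME.NEO_BABYLON,
--         BIOME.SUNKEN_CITY,
--     ]
--     for x, themeselect in enumerate(dm_themes):
--         if lvl.startswith("dm" + str(x + 1)):
--             return themeselect
--     return BIOME.DWELLING
-- ===== SOURCE B (Python) =====
-- # B: instead of a 15-branch if/elif chain scanned first-match-first, index the match
-- # patterns in hash tables keyed by pattern length, probe each length once with a slice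
-- # of lvl, and return the biome of the lowest-priority-number hit (priority = original
-- # branch order, so the original precedence, e.g. "ending_hard" over "end", is kept).
--
-- RULES = [  # (kind, pattern, biome); position in this list = priority (lower wins)
--     ("p", "challenge_sun", "sunken"),
--     ("p", "sunken", "sunken"),
--     ("p", "hundun", "sunken"),
--     ("p", "ending_hard", "sunken"),
--     ("s", "_sunkencity.lvl", "sunken"),
--     ("p", "abzu.lvl", "tidepool"),
--     ("p", "lake", "tidepool"),
--     ("p", "tide", "tidepool"),
--     ("p", "end", "tidepool"),
--     ("s", "_tidepool.lvl", "tidepool"),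
--     ("p", "babylon", "babylon"),
--     ("p", "hallofu", "babylon"),
--     ("s", "_babylon.lvl", "babylon"),
--     ("p", "palace", "babylon"),
--     ("p", "tiamat", "babylon"),
--     ("p", "basecamp", "cave"),
--     ("p", "beehive", "beehive"),
--     ("p", "blackmark", "jungle"),
--     ("p", "jungle", "jungle"),
--     ("p", "challenge_moon", "jungle"),
--     ("s", "_jungle.lvl", "jungle"),
--     ("p", "challenge_star", "temple"),
--     ("p", "temple", "temple"),
--     ("s", "_temple.lvl", "temple"),
--     ("p", "city", "gold"),
--     ("p", "duat", "duat"),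
--     ("p", "egg", "eggplant"),
--     ("p", "ice", "ice"),
--     ("s", "_icecavesarea.lvl", "ice"),
--     ("p", "olmec", "olmec"),
--     ("p", "vlad", "volcano"),
--     ("p", "volcano", "volcano"),
--     ("s", "_volcano.lvl", "volcano"),
--     ("p", "dm1", "cave"),
--     ("p", "dm2", "jungle"),
--     ("p", "dm3", "volcano"),
--     ("p", "dm4", "tidepool"),
--     ("p", "dm5", "temple"),
--     ("p", "dm6", "ice"),
--     ("p", "dm7", "babylon"),
--     ("p", "dm8", "sunken"),
-- ]
--
-- # length -> {pattern: (priority, biome)}; patterns of equal length and kind are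
-- # mutually exclusive matches, so one dict probe per length replaces a rule scan
-- _PREFIX_INDEX = {}
-- _SUFFIX_INDEX = {}
-- for _i, (_kind, _pat, _biome) in enumerate(RULES):
--     _idx = _PREFIX_INDEX if _kind == "p" else _SUFFIX_INDEX
--     _idx.setdefault(len(_pat), {})[_pat] = (_i, _biome)
--
--
-- def get_biome_for_level(lvl):
--     hits = []
--     for k, tbl in _PREFIX_INDEX.items():
--         hit = tbl.get(lvl[:k])
--         if hit is not None:
--             hits.append(hit)
--     for k, tbl in _SUFFIX_INDEX.items():
--         hit = tbl.get(lvl[-k:])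
--         if hit is not None:
--             hits.append(hit)
--     return min(hits)[1] if hits else "cave"
-- ===== Notes on version B (the rewrite author's own statement) =====
-- stated objective: alternative
-- what changed: Replaced the 15-branch if/elif first-match chain plus the dm1..dm8 enumerate loop by hash tables of prefix/suffix patterns indexed by pattern length, probed once per length with a slice of lvl; all hits are collected and the one with the lowest priority number (priorities follow the original branch order) is returned, with the original default biome when nothing matches.
import Mathlib
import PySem

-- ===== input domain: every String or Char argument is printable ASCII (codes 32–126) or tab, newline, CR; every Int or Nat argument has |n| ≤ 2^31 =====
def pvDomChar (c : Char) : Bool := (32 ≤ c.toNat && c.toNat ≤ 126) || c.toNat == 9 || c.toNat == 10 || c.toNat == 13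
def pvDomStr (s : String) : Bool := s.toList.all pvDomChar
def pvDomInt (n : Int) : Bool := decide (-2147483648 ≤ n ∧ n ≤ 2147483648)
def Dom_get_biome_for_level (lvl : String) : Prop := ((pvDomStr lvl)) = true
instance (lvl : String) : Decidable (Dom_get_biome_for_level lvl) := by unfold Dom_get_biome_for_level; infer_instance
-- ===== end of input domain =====

-- B replaces A's if/elif chain (a linear first-match scan of prefix/suffix tests) by
-- hash tables of patterns keyed by pattern length, probed once per length with a slice
-- of lvl, returning the lowest-priority-number hit; objective: alternative data structure.

-- ===== PORT A =====
-- the trailing 'for x, themeselect in enumerate(dm_themes): if lvl.startswith("dm"+str(x+1)): return themeselect' loop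
def pvDmFor (lvl : String) : List (Int × String) → String
  | [] => "cave"
  | (x, themeselect) :: rest =>
    if PySem.Str.startswith lvl ("dm" ++ PySem.Int.toStr (x + 1)) then themeselect
    else pvDmFor lvl rest

def get_biome_for_level (lvl : String) : String :=
  if PySem.Str.startswith lvl "challenge_sun" || PySem.Str.startswith lvl "sunken"
      || PySem.Str.startswith lvl "hundun" || PySem.Str.startswith lvl "ending_hard"
      || PySem.Str.endswith lvl "_sunkencity.lvl" then "sunken"
  else if PySem.Str.startswith lvl "abzu.lvl" || PySem.Str.startswith lvl "lake"
      || PySem.Str.startswith lvl "tide" || PySem.Str.startswith lvl "end"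
      || PySem.Str.endswith lvl "_tidepool.lvl" then "tidepool"
  else if PySem.Str.startswith lvl "babylon" || PySem.Str.startswith lvl "hallofu"
      || PySem.Str.endswith lvl "_babylon.lvl" || PySem.Str.startswith lvl "palace"
      || PySem.Str.startswith lvl "tiamat" then "babylon"
  else if PySem.Str.startswith lvl "basecamp" then "cave"
  else if PySem.Str.startswith lvl "beehive" then "beehive"
  else if PySem.Str.startswith lvl "blackmark" || PySem.Str.startswith lvl "jungle"
      || PySem.Str.startswith lvl "challenge_moon" || PySem.Str.endswith lvl "_jungle.lvl" then "jungle"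
  else if PySem.Str.startswith lvl "challenge_star" || PySem.Str.startswith lvl "temple"
      || PySem.Str.endswith lvl "_temple.lvl" then "temple"
  else if PySem.Str.startswith lvl "city" then "gold"
  else if PySem.Str.startswith lvl "duat" then "duat"
  else if PySem.Str.startswith lvl "egg" then "eggplant"
  else if PySem.Str.startswith lvl "ice" || PySem.Str.endswith lvl "_icecavesarea.lvl" then "ice"
  else if PySem.Str.startswith lvl "olmec" then "olmec"
  else if PySem.Str.startswith lvl "vlad" then "volcano"
  else if PySem.Str.startswith lvl "volcano" || PySem.Str.endswith lvl "_volcano.lvl" then "volcano"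
  else
    let dm_themes := ["cave", "jungle", "volcano", "tidepool", "temple", "ice", "babylon", "sunken"]
    pvDmFor lvl (PySem.List.enumerate dm_themes)

-- ===== PORT B =====
-- RULES: (kind, pattern, biome); position = priority (lower wins)
def pvRulesB : List (String × String × String) :=
  [("p", "challenge_sun", "sunken"),
   ("p", "sunken", "sunken"),
   ("p", "hundun", "sunken"),
   ("p", "ending_hard", "sunken"),
   ("s", "_sunkencity.lvl", "sunken"),
   ("p", "abzu.lvl", "tidepool"),
   ("p", "lake", "tidepool"),
   ("p", "tide", "tidepool"),
   ("p", "end", "tidepool"),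
   ("s", "_tidepool.lvl", "tidepool"),
   ("p", "babylon", "babylon"),
   ("p", "hallofu", "babylon"),
   ("s", "_babylon.lvl", "babylon"),
   ("p", "palace", "babylon"),
   ("p", "tiamat", "babylon"),
   ("p", "basecamp", "cave"),
   ("p", "beehive", "beehive"),
   ("p", "blackmark", "jungle"),
   ("p", "jungle", "jungle"),
   ("p", "challenge_moon", "jungle"),
   ("s", "_jungle.lvl", "jungle"),
   ("p", "challenge_star", "temple"),
   ("p", "temple", "temple"),
   ("s", "_temple.lvl", "temple"),
   ("p", "city", "gold"),
   ("p", "duat", "duat"),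
   ("p", "egg", "eggplant"),
   ("p", "ice", "ice"),
   ("s", "_icecavesarea.lvl", "ice"),
   ("p", "olmec", "olmec"),
   ("p", "vlad", "volcano"),
   ("p", "volcano", "volcano"),
   ("s", "_volcano.lvl", "volcano"),
   ("p", "dm1", "cave"),
   ("p", "dm2", "jungle"),
   ("p", "dm3", "volcano"),
   ("p", "dm4", "tidepool"),
   ("p", "dm5", "temple"),
   ("p", "dm6", "ice"),
   ("p", "dm7", "babylon"),
   ("p", "dm8", "sunken")]

-- module-level index build: length -> {pattern: (priority, biome)}, one dict per kind
def pvIndexes :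
    PySem.Dict Int (PySem.Dict String (Int × String)) ×
    PySem.Dict Int (PySem.Dict String (Int × String)) :=
  (PySem.List.enumerate pvRulesB).foldl
    (fun idxs ir =>
      if ir.2.1 == "p" then
        (idxs.1.insert (PySem.Str.len ir.2.2.1)
          ((idxs.1.getD (PySem.Str.len ir.2.2.1) (PySem.Dict.mk [])).insert ir.2.2.1 (ir.1, ir.2.2.2)),
         idxs.2)
      else
        (idxs.1,
         idxs.2.insert (PySem.Str.len ir.2.2.1)
          ((idxs.2.getD (PySem.Str.len ir.2.2.1) (PySem.Dict.mk [])).insert ir.2.2.1 (ir.1, ir.2.2.2))))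
    (PySem.Dict.mk [], PySem.Dict.mk [])

def get_biome_for_level_alt (lvl : String) : String :=
  let hits1 := (pvIndexes.1).items.foldl
    (fun acc kt =>
      match PySem.Dict.get? kt.2 (PySem.Str.slice lvl none (some kt.1)) with
      | some hit => acc ++ [hit]
      | none => acc) ([] : List (Int × String))
  let hits := (pvIndexes.2).items.foldl
    (fun acc kt =>
      match PySem.Dict.get? kt.2 (PySem.Str.slice lvl (some (-kt.1)) none) with
      | some hit => acc ++ [hit]
      | none => acc) hits1
  match PySem.List.min2? hits (fun h => h.1) (fun h => h.2) with
  | some h => h.2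
  | none => "cave"

-- ===== PRECONDITION & SPEC =====
def Spec_get_biome_for_level (lvl : String) (out : String) : Prop := out = get_biome_for_level_alt lvl
instance (lvl : String) (out : String) : Decidable (Spec_get_biome_for_level lvl out) := by unfold Spec_get_biome_for_level; infer_instance

-- ===== CLAIM (what is proved, stated in full; the proofs are below) =====
def Claim_equal_get_biome_for_level : Prop := ∀ (lvl : String), Dom_get_biome_for_level lvl → Spec_get_biome_for_level lvl (get_biome_for_level lvl)

-- ===== LEMMAS AND PROOFS =====

-- the rules of both programs as one list in A's branch order: (isPrefix, pattern, priority, biome)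
def pvRules : List (Bool × String × Int × String) :=
  [(true, "challenge_sun", (0 : Int), "sunken"),
   (true, "sunken", (1 : Int), "sunken"),
   (true, "hundun", (2 : Int), "sunken"),
   (true, "ending_hard", (3 : Int), "sunken"),
   (false, "_sunkencity.lvl", (4 : Int), "sunken"),
   (true, "abzu.lvl", (5 : Int), "tidepool"),
   (true, "lake", (6 : Int), "tidepool"),
   (true, "tide", (7 : Int), "tidepool"),
   (true, "end", (8 : Int), "tidepool"),
   (false, "_tidepool.lvl", (9 : Int), "tidepool"),
   (true, "babylon", (10 : Int), "babylon"),
   (true, "hallofu", (11 : Int), "babylon"),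
   (false, "_babylon.lvl", (12 : Int), "babylon"),
   (true, "palace", (13 : Int), "babylon"),
   (true, "tiamat", (14 : Int), "babylon"),
   (true, "basecamp", (15 : Int), "cave"),
   (true, "beehive", (16 : Int), "beehive"),
   (true, "blackmark", (17 : Int), "jungle"),
   (true, "jungle", (18 : Int), "jungle"),
   (true, "challenge_moon", (19 : Int), "jungle"),
   (false, "_jungle.lvl", (20 : Int), "jungle"),
   (true, "challenge_star", (21 : Int), "temple"),
   (true, "temple", (22 : Int), "temple"),
   (false, "_temple.lvl", (23 : Int), "temple"),
   (true, "city", (24 : Int), "gold"),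
   (true, "duat", (25 : Int), "duat"),
   (true, "egg", (26 : Int), "eggplant"),
   (true, "ice", (27 : Int), "ice"),
   (false, "_icecavesarea.lvl", (28 : Int), "ice"),
   (true, "olmec", (29 : Int), "olmec"),
   (true, "vlad", (30 : Int), "volcano"),
   (true, "volcano", (31 : Int), "volcano"),
   (false, "_volcano.lvl", (32 : Int), "volcano"),
   (true, "dm1", (33 : Int), "cave"),
   (true, "dm2", (34 : Int), "jungle"),
   (true, "dm3", (35 : Int), "volcano"),
   (true, "dm4", (36 : Int), "tidepool"),
   (true, "dm5", (37 : Int), "temple"),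
   (true, "dm6", (38 : Int), "ice"),
   (true, "dm7", (39 : Int), "babylon"),
   (true, "dm8", (40 : Int), "sunken")]

def pvTest (lvl : String) (r : Bool × String × Int × String) : Bool :=
  cond r.1 (PySem.Str.startswith lvl r.2.1) (PySem.Str.endswith lvl r.2.1)

def pvPay (r : Bool × String × Int × String) : Int × String := (r.2.2.1, r.2.2.2)

-- the index tables pvIndexes evaluates to (checked by decide below)
def pvPGroups : List (Int × PySem.Dict String (Int × String)) :=
  [((13 : Int), PySem.Dict.mk [("challenge_sun", ((0 : Int), "sunken"))]),
   ((6 : Int), PySem.Dict.mk [("sunken", ((1 : Int), "sunken")), ("hundun", ((2 : Int), "sunken")), ("palace", ((13 : Int), "babylon")), ("tiamat", ((14 : Int), "babylon")), ("jungle", ((18 : Int), "jungle")), ("temple", ((22 : Int), "temple"))]),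
   ((11 : Int), PySem.Dict.mk [("ending_hard", ((3 : Int), "sunken"))]),
   ((8 : Int), PySem.Dict.mk [("abzu.lvl", ((5 : Int), "tidepool")), ("basecamp", ((15 : Int), "cave"))]),
   ((4 : Int), PySem.Dict.mk [("lake", ((6 : Int), "tidepool")), ("tide", ((7 : Int), "tidepool")), ("city", ((24 : Int), "gold")), ("duat", ((25 : Int), "duat")), ("vlad", ((30 : Int), "volcano"))]),
   ((3 : Int), PySem.Dict.mk [("end", ((8 : Int), "tidepool")), ("egg", ((26 : Int), "eggplant")), ("ice", ((27 : Int), "ice")), ("dm1", ((33 : Int), "cave")), ("dm2", ((34 : Int), "jungle")), ("dm3", ((35 : Int), "volcano")), ("dm4", ((36 : Int), "tidepool")), ("dm5", ((37 : Int), "temple")), ("dm6", ((38 : Int), "ice")), ("dm7", ((39 : Int), "babylon")), ("dm8", ((40 : Int), "sunken"))]),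
   ((7 : Int), PySem.Dict.mk [("babylon", ((10 : Int), "babylon")), ("hallofu", ((11 : Int), "babylon")), ("beehive", ((16 : Int), "beehive")), ("volcano", ((31 : Int), "volcano"))]),
   ((9 : Int), PySem.Dict.mk [("blackmark", ((17 : Int), "jungle"))]),
   ((14 : Int), PySem.Dict.mk [("challenge_moon", ((19 : Int), "jungle")), ("challenge_star", ((21 : Int), "temple"))]),
   ((5 : Int), PySem.Dict.mk [("olmec", ((29 : Int), "olmec"))])]

def pvSGroups : List (Int × PySem.Dict String (Int × String)) :=
  [((15 : Int), PySem.Dict.mk [("_sunkencity.lvl", ((4 : Int), "sunken"))]),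
   ((13 : Int), PySem.Dict.mk [("_tidepool.lvl", ((9 : Int), "tidepool"))]),
   ((12 : Int), PySem.Dict.mk [("_babylon.lvl", ((12 : Int), "babylon")), ("_volcano.lvl", ((32 : Int), "volcano"))]),
   ((11 : Int), PySem.Dict.mk [("_jungle.lvl", ((20 : Int), "jungle")), ("_temple.lvl", ((23 : Int), "temple"))]),
   ((17 : Int), PySem.Dict.mk [("_icecavesarea.lvl", ((28 : Int), "ice"))])]

set_option maxRecDepth 8192 in
lemma pvIndexes_eval : pvIndexes = (PySem.Dict.mk pvPGroups, PySem.Dict.mk pvSGroups) := by decide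

-- B's collected hits, written as one list
def pvHitsB (lvl : String) : List (Int × String) :=
  pvPGroups.flatMap (fun kt => (PySem.Dict.get? kt.2 (PySem.Str.slice lvl none (some kt.1))).toList)
  ++ pvSGroups.flatMap (fun kt => (PySem.Dict.get? kt.2 (PySem.Str.slice lvl (some (-kt.1)) none)).toList)

-- slice-vs-pattern equality is exactly startswith / endswith (pattern length = slice bound)
lemma pv_pre (lvl p : String) (k : Int) (hk : (p.toList.length : Int) = k) :
    (p == PySem.Str.slice lvl none (some k)) = PySem.Str.startswith lvl p := by
  subst hk
  rw [Bool.eq_iff_iff, beq_iff_eq, String.ext_iff, PySem.Str.startswith_eq,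
    PySem.Chars.startswith_iff, PySem.Str.toList_slice, PySem.Chars.slice_eq_listSlice,
    PySem.List.slice_to _ (by positivity), List.prefix_iff_eq_take]
  simp

lemma pv_suf (lvl p : String) (k : Int) (hk : (p.toList.length : Int) = k) (hpos : 0 < k) :
    (p == PySem.Str.slice lvl (some (-k)) none) = PySem.Str.endswith lvl p := by
  subst hk
  rw [Bool.eq_iff_iff, beq_iff_eq, String.ext_iff, PySem.Str.endswith_eq,
    PySem.Chars.endswith_iff, PySem.Str.toList_slice, PySem.Chars.slice_eq_listSlice]
  rw [show ((p.toList.length : Int)) = ((p.toList.length : Nat) : Int) from rfl] at *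
  rw [PySem.List.slice_from_neg_natCast _ _ (by exact_mod_cast hpos), List.suffix_iff_eq_drop]

-- B's result bridge: alt computes min2? over pvHitsB
lemma pvB_bridge (lvl : String) :
    get_biome_for_level_alt lvl =
      match PySem.List.min2? (pvHitsB lvl) (fun h => h.1) (fun h => h.2) with
      | some h => h.2
      | none => "cave" := by
  have hstep : ∀ (look : (Int × PySem.Dict String (Int × String)) → Option (Int × String))
      (gs : List (Int × PySem.Dict String (Int × String))) (acc : List (Int × String)),
      gs.foldl (fun acc kt => match look kt with
        | some hit => acc ++ [hit]
        | none => acc) acc = acc ++ gs.flatMap (fun kt => (look kt).toList) := by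
    intro look gs acc
    rw [← PySem.List.foldl_append_eq_flatMap]
    apply PySem.List.foldl_congr_mem
    intro a kt _
    cases look kt <;> simp [Option.toList]
  unfold get_biome_for_level_alt
  rw [pvIndexes_eval]
  simp only [PySem.Dict.items]
  rw [hstep (fun kt => PySem.Dict.get? kt.2 (PySem.Str.slice lvl none (some kt.1))),
      hstep (fun kt => PySem.Dict.get? kt.2 (PySem.Str.slice lvl (some (-kt.1)) none))]
  simp [pvHitsB]

-- A's result bridge: first match over pvRules
lemma pv_find_cons_ite {α : Type} (p : α → Bool) (a : α) (l : List α) :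
    List.find? p (a :: l) = if p a then some a else List.find? p l := by
  rw [List.find?_cons]; cases p a <;> simp

lemma pv_map_getD_ite {α β : Type} (c : Prop) [Decidable c] (a : α) (o : Option α)
    (f : α → β) (d : β) :
    (((if c then some a else o).map f).getD d) = if c then f a else ((o.map f).getD d) := by
  split_ifs <;> rfl

lemma pv_ite_or {α : Type} (a b : Bool) (x y : α) :
    (if (a || b) then x else y) = if a then x else if b then x else y := by
  cases a <;> simp

lemma pvA_bridge (lvl : String) :
    get_biome_for_level lvl =
      ((pvRules.find? (pvTest lvl)).map (fun r => r.2.2.2)).getD "cave" := by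
  unfold get_biome_for_level
  simp only [pvRules, pvTest, PySem.List.enumerate, pvDmFor, pv_ite_or, Int.reduceAdd,
    show ("dm" ++ PySem.Int.toStr 1) = "dm1" from by decide,
    show ("dm" ++ PySem.Int.toStr 2) = "dm2" from by decide,
    show ("dm" ++ PySem.Int.toStr 3) = "dm3" from by decide,
    show ("dm" ++ PySem.Int.toStr 4) = "dm4" from by decide,
    show ("dm" ++ PySem.Int.toStr 5) = "dm5" from by decide,
    show ("dm" ++ PySem.Int.toStr 6) = "dm6" from by decide,
    show ("dm" ++ PySem.Int.toStr 7) = "dm7" from by decide,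
    show ("dm" ++ PySem.Int.toStr 8) = "dm8" from by decide,
    pv_find_cons_ite, pv_map_getD_ite, List.find?_nil, Option.map_none, Option.getD_none,
    cond_true, cond_false]

-- every collected hit is the payload of a matching rule
lemma pv_hits_sound (lvl : String) :
    ∀ h ∈ pvHitsB lvl, ∃ r, r ∈ pvRules ∧ pvTest lvl r = true ∧ h = pvPay r := by
  intro h hmem
  simp only [pvHitsB, pvPGroups, pvSGroups, List.mem_append, List.mem_flatMap,
    List.mem_cons, List.not_mem_nil, or_false, exists_eq_or_imp, exists_eq_left,
    Option.mem_toList, PySem.Dict.get?_mk_cons,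
    pv_pre lvl "challenge_sun" 13 (by decide),
    pv_pre lvl "sunken" 6 (by decide),
    pv_pre lvl "hundun" 6 (by decide),
    pv_pre lvl "ending_hard" 11 (by decide),
    pv_suf lvl "_sunkencity.lvl" 15 (by decide) (by decide),
    pv_pre lvl "abzu.lvl" 8 (by decide),
    pv_pre lvl "lake" 4 (by decide),
    pv_pre lvl "tide" 4 (by decide),
    pv_pre lvl "end" 3 (by decide),
    pv_suf lvl "_tidepool.lvl" 13 (by decide) (by decide),
    pv_pre lvl "babylon" 7 (by decide),
    pv_pre lvl "hallofu" 7 (by decide),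
    pv_suf lvl "_babylon.lvl" 12 (by decide) (by decide),
    pv_pre lvl "palace" 6 (by decide),
    pv_pre lvl "tiamat" 6 (by decide),
    pv_pre lvl "basecamp" 8 (by decide),
    pv_pre lvl "beehive" 7 (by decide),
    pv_pre lvl "blackmark" 9 (by decide),
    pv_pre lvl "jungle" 6 (by decide),
    pv_pre lvl "challenge_moon" 14 (by decide),
    pv_suf lvl "_jungle.lvl" 11 (by decide) (by decide),
    pv_pre lvl "challenge_star" 14 (by decide),
    pv_pre lvl "temple" 6 (by decide),
    pv_suf lvl "_temple.lvl" 11 (by decide) (by decide),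
    pv_pre lvl "city" 4 (by decide),
    pv_pre lvl "duat" 4 (by decide),
    pv_pre lvl "egg" 3 (by decide),
    pv_pre lvl "ice" 3 (by decide),
    pv_suf lvl "_icecavesarea.lvl" 17 (by decide) (by decide),
    pv_pre lvl "olmec" 5 (by decide),
    pv_pre lvl "vlad" 4 (by decide),
    pv_pre lvl "volcano" 7 (by decide),
    pv_suf lvl "_volcano.lvl" 12 (by decide) (by decide),
    pv_pre lvl "dm1" 3 (by decide),
    pv_pre lvl "dm2" 3 (by decide),
    pv_pre lvl "dm3" 3 (by decide),
    pv_pre lvl "dm4" 3 (by decide),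
    pv_pre lvl "dm5" 3 (by decide),
    pv_pre lvl "dm6" 3 (by decide),
    pv_pre lvl "dm7" 3 (by decide),
    pv_pre lvl "dm8" 3 (by decide)] at hmem
  simp only [PySem.Dict.get?, List.find?_nil, Option.map_none] at hmem
  simp only [pvRules, pvTest, pvPay, List.mem_cons, List.not_mem_nil, or_false,
    exists_eq_or_imp, exists_eq_left, cond_true, cond_false]
  rcases hmem with (hm|hm|hm|hm|hm|hm|hm|hm|hm|hm)|(hm|hm|hm|hm|hm) <;>
    (repeat' split at hm) <;> simp_all

-- each matching rule's payload is collected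
lemma pv_inB_0 (lvl : String)
    (h : PySem.Str.startswith lvl "challenge_sun" = true) :
    ((0 : Int), "sunken") ∈ pvHitsB lvl := by
  have h2 := pv_pre lvl "challenge_sun" 13 (by decide)
  rw [h] at h2
  have hs := eq_of_beq h2
  simp [pvHitsB, pvPGroups, pvSGroups, PySem.Dict.get?_mk_cons, ← hs]

lemma pv_inB_1 (lvl : String)
    (h : PySem.Str.startswith lvl "sunken" = true) :
    ((1 : Int), "sunken") ∈ pvHitsB lvl := by
  have h2 := pv_pre lvl "sunken" 6 (by decide)
  rw [h] at h2
  have hs := eq_of_beq h2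
  simp [pvHitsB, pvPGroups, pvSGroups, PySem.Dict.get?_mk_cons, ← hs]

lemma pv_inB_2 (lvl : String)
    (h : PySem.Str.startswith lvl "hundun" = true) :
    ((2 : Int), "sunken") ∈ pvHitsB lvl := by
  have h2 := pv_pre lvl "hundun" 6 (by decide)
  rw [h] at h2
  have hs := eq_of_beq h2
  simp [pvHitsB, pvPGroups, pvSGroups, PySem.Dict.get?_mk_cons, ← hs]

lemma pv_inB_3 (lvl : String)
    (h : PySem.Str.startswith lvl "ending_hard" = true) :
    ((3 : Int), "sunken") ∈ pvHitsB lvl := by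
  have h2 := pv_pre lvl "ending_hard" 11 (by decide)
  rw [h] at h2
  have hs := eq_of_beq h2
  simp [pvHitsB, pvPGroups, pvSGroups, PySem.Dict.get?_mk_cons, ← hs]

lemma pv_inB_4 (lvl : String)
    (h : PySem.Str.endswith lvl "_sunkencity.lvl" = true) :
    ((4 : Int), "sunken") ∈ pvHitsB lvl := by
  have h2 := pv_suf lvl "_sunkencity.lvl" 15 (by decide) (by decide)
  rw [h] at h2
  have hs := eq_of_beq h2
  simp [pvHitsB, pvPGroups, pvSGroups, PySem.Dict.get?_mk_cons, ← hs]

lemma pv_inB_5 (lvl : String)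
    (h : PySem.Str.startswith lvl "abzu.lvl" = true) :
    ((5 : Int), "tidepool") ∈ pvHitsB lvl := by
  have h2 := pv_pre lvl "abzu.lvl" 8 (by decide)
  rw [h] at h2
  have hs := eq_of_beq h2
  simp [pvHitsB, pvPGroups, pvSGroups, PySem.Dict.get?_mk_cons, ← hs]

lemma pv_inB_6 (lvl : String)
    (h : PySem.Str.startswith lvl "lake" = true) :
    ((6 : Int), "tidepool") ∈ pvHitsB lvl := by
  have h2 := pv_pre lvl "lake" 4 (by decide)
  rw [h] at h2
  have hs := eq_of_beq h2
  simp [pvHitsB, pvPGroups, pvSGroups, PySem.Dict.get?_mk_cons, ← hs]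

lemma pv_inB_7 (lvl : String)
    (h : PySem.Str.startswith lvl "tide" = true) :
    ((7 : Int), "tidepool") ∈ pvHitsB lvl := by
  have h2 := pv_pre lvl "tide" 4 (by decide)
  rw [h] at h2
  have hs := eq_of_beq h2
  simp [pvHitsB, pvPGroups, pvSGroups, PySem.Dict.get?_mk_cons, ← hs]

lemma pv_inB_8 (lvl : String)
    (h : PySem.Str.startswith lvl "end" = true) :
    ((8 : Int), "tidepool") ∈ pvHitsB lvl := by
  have h2 := pv_pre lvl "end" 3 (by decide)
  rw [h] at h2
  have hs := eq_of_beq h2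
  simp [pvHitsB, pvPGroups, pvSGroups, PySem.Dict.get?_mk_cons, ← hs]

lemma pv_inB_9 (lvl : String)
    (h : PySem.Str.endswith lvl "_tidepool.lvl" = true) :
    ((9 : Int), "tidepool") ∈ pvHitsB lvl := by
  have h2 := pv_suf lvl "_tidepool.lvl" 13 (by decide) (by decide)
  rw [h] at h2
  have hs := eq_of_beq h2
  simp [pvHitsB, pvPGroups, pvSGroups, PySem.Dict.get?_mk_cons, ← hs]

lemma pv_inB_10 (lvl : String)
    (h : PySem.Str.startswith lvl "babylon" = true) :
    ((10 : Int), "babylon") ∈ pvHitsB lvl := by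
  have h2 := pv_pre lvl "babylon" 7 (by decide)
  rw [h] at h2
  have hs := eq_of_beq h2
  simp [pvHitsB, pvPGroups, pvSGroups, PySem.Dict.get?_mk_cons, ← hs]

lemma pv_inB_11 (lvl : String)
    (h : PySem.Str.startswith lvl "hallofu" = true) :
    ((11 : Int), "babylon") ∈ pvHitsB lvl := by
  have h2 := pv_pre lvl "hallofu" 7 (by decide)
  rw [h] at h2
  have hs := eq_of_beq h2
  simp [pvHitsB, pvPGroups, pvSGroups, PySem.Dict.get?_mk_cons, ← hs]

lemma pv_inB_12 (lvl : String)
    (h : PySem.Str.endswith lvl "_babylon.lvl" = true) :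
    ((12 : Int), "babylon") ∈ pvHitsB lvl := by
  have h2 := pv_suf lvl "_babylon.lvl" 12 (by decide) (by decide)
  rw [h] at h2
  have hs := eq_of_beq h2
  simp [pvHitsB, pvPGroups, pvSGroups, PySem.Dict.get?_mk_cons, ← hs]

lemma pv_inB_13 (lvl : String)
    (h : PySem.Str.startswith lvl "palace" = true) :
    ((13 : Int), "babylon") ∈ pvHitsB lvl := by
  have h2 := pv_pre lvl "palace" 6 (by decide)
  rw [h] at h2
  have hs := eq_of_beq h2
  simp [pvHitsB, pvPGroups, pvSGroups, PySem.Dict.get?_mk_cons, ← hs]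

lemma pv_inB_14 (lvl : String)
    (h : PySem.Str.startswith lvl "tiamat" = true) :
    ((14 : Int), "babylon") ∈ pvHitsB lvl := by
  have h2 := pv_pre lvl "tiamat" 6 (by decide)
  rw [h] at h2
  have hs := eq_of_beq h2
  simp [pvHitsB, pvPGroups, pvSGroups, PySem.Dict.get?_mk_cons, ← hs]

lemma pv_inB_15 (lvl : String)
    (h : PySem.Str.startswith lvl "basecamp" = true) :
    ((15 : Int), "cave") ∈ pvHitsB lvl := by
  have h2 := pv_pre lvl "basecamp" 8 (by decide)
  rw [h] at h2
  have hs := eq_of_beq h2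
  simp [pvHitsB, pvPGroups, pvSGroups, PySem.Dict.get?_mk_cons, ← hs]

lemma pv_inB_16 (lvl : String)
    (h : PySem.Str.startswith lvl "beehive" = true) :
    ((16 : Int), "beehive") ∈ pvHitsB lvl := by
  have h2 := pv_pre lvl "beehive" 7 (by decide)
  rw [h] at h2
  have hs := eq_of_beq h2
  simp [pvHitsB, pvPGroups, pvSGroups, PySem.Dict.get?_mk_cons, ← hs]

lemma pv_inB_17 (lvl : String)
    (h : PySem.Str.startswith lvl "blackmark" = true) :
    ((17 : Int), "jungle") ∈ pvHitsB lvl := by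
  have h2 := pv_pre lvl "blackmark" 9 (by decide)
  rw [h] at h2
  have hs := eq_of_beq h2
  simp [pvHitsB, pvPGroups, pvSGroups, PySem.Dict.get?_mk_cons, ← hs]

lemma pv_inB_18 (lvl : String)
    (h : PySem.Str.startswith lvl "jungle" = true) :
    ((18 : Int), "jungle") ∈ pvHitsB lvl := by
  have h2 := pv_pre lvl "jungle" 6 (by decide)
  rw [h] at h2
  have hs := eq_of_beq h2
  simp [pvHitsB, pvPGroups, pvSGroups, PySem.Dict.get?_mk_cons, ← hs]

lemma pv_inB_19 (lvl : String)
    (h : PySem.Str.startswith lvl "challenge_moon" = true) :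
    ((19 : Int), "jungle") ∈ pvHitsB lvl := by
  have h2 := pv_pre lvl "challenge_moon" 14 (by decide)
  rw [h] at h2
  have hs := eq_of_beq h2
  simp [pvHitsB, pvPGroups, pvSGroups, PySem.Dict.get?_mk_cons, ← hs]

lemma pv_inB_20 (lvl : String)
    (h : PySem.Str.endswith lvl "_jungle.lvl" = true) :
    ((20 : Int), "jungle") ∈ pvHitsB lvl := by
  have h2 := pv_suf lvl "_jungle.lvl" 11 (by decide) (by decide)
  rw [h] at h2
  have hs := eq_of_beq h2
  simp [pvHitsB, pvPGroups, pvSGroups, PySem.Dict.get?_mk_cons, ← hs]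

lemma pv_inB_21 (lvl : String)
    (h : PySem.Str.startswith lvl "challenge_star" = true) :
    ((21 : Int), "temple") ∈ pvHitsB lvl := by
  have h2 := pv_pre lvl "challenge_star" 14 (by decide)
  rw [h] at h2
  have hs := eq_of_beq h2
  simp [pvHitsB, pvPGroups, pvSGroups, PySem.Dict.get?_mk_cons, ← hs]

lemma pv_inB_22 (lvl : String)
    (h : PySem.Str.startswith lvl "temple" = true) :
    ((22 : Int), "temple") ∈ pvHitsB lvl := by
  have h2 := pv_pre lvl "temple" 6 (by decide)
  rw [h] at h2
  have hs := eq_of_beq h2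
  simp [pvHitsB, pvPGroups, pvSGroups, PySem.Dict.get?_mk_cons, ← hs]

lemma pv_inB_23 (lvl : String)
    (h : PySem.Str.endswith lvl "_temple.lvl" = true) :
    ((23 : Int), "temple") ∈ pvHitsB lvl := by
  have h2 := pv_suf lvl "_temple.lvl" 11 (by decide) (by decide)
  rw [h] at h2
  have hs := eq_of_beq h2
  simp [pvHitsB, pvPGroups, pvSGroups, PySem.Dict.get?_mk_cons, ← hs]

lemma pv_inB_24 (lvl : String)
    (h : PySem.Str.startswith lvl "city" = true) :
    ((24 : Int), "gold") ∈ pvHitsB lvl := by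
  have h2 := pv_pre lvl "city" 4 (by decide)
  rw [h] at h2
  have hs := eq_of_beq h2
  simp [pvHitsB, pvPGroups, pvSGroups, PySem.Dict.get?_mk_cons, ← hs]

lemma pv_inB_25 (lvl : String)
    (h : PySem.Str.startswith lvl "duat" = true) :
    ((25 : Int), "duat") ∈ pvHitsB lvl := by
  have h2 := pv_pre lvl "duat" 4 (by decide)
  rw [h] at h2
  have hs := eq_of_beq h2
  simp [pvHitsB, pvPGroups, pvSGroups, PySem.Dict.get?_mk_cons, ← hs]

lemma pv_inB_26 (lvl : String)
    (h : PySem.Str.startswith lvl "egg" = true) :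
    ((26 : Int), "eggplant") ∈ pvHitsB lvl := by
  have h2 := pv_pre lvl "egg" 3 (by decide)
  rw [h] at h2
  have hs := eq_of_beq h2
  simp [pvHitsB, pvPGroups, pvSGroups, PySem.Dict.get?_mk_cons, ← hs]

lemma pv_inB_27 (lvl : String)
    (h : PySem.Str.startswith lvl "ice" = true) :
    ((27 : Int), "ice") ∈ pvHitsB lvl := by
  have h2 := pv_pre lvl "ice" 3 (by decide)
  rw [h] at h2
  have hs := eq_of_beq h2
  simp [pvHitsB, pvPGroups, pvSGroups, PySem.Dict.get?_mk_cons, ← hs]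

lemma pv_inB_28 (lvl : String)
    (h : PySem.Str.endswith lvl "_icecavesarea.lvl" = true) :
    ((28 : Int), "ice") ∈ pvHitsB lvl := by
  have h2 := pv_suf lvl "_icecavesarea.lvl" 17 (by decide) (by decide)
  rw [h] at h2
  have hs := eq_of_beq h2
  simp [pvHitsB, pvPGroups, pvSGroups, PySem.Dict.get?_mk_cons, ← hs]

lemma pv_inB_29 (lvl : String)
    (h : PySem.Str.startswith lvl "olmec" = true) :
    ((29 : Int), "olmec") ∈ pvHitsB lvl := by
  have h2 := pv_pre lvl "olmec" 5 (by decide)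
  rw [h] at h2
  have hs := eq_of_beq h2
  simp [pvHitsB, pvPGroups, pvSGroups, PySem.Dict.get?_mk_cons, ← hs]

lemma pv_inB_30 (lvl : String)
    (h : PySem.Str.startswith lvl "vlad" = true) :
    ((30 : Int), "volcano") ∈ pvHitsB lvl := by
  have h2 := pv_pre lvl "vlad" 4 (by decide)
  rw [h] at h2
  have hs := eq_of_beq h2
  simp [pvHitsB, pvPGroups, pvSGroups, PySem.Dict.get?_mk_cons, ← hs]

lemma pv_inB_31 (lvl : String)
    (h : PySem.Str.startswith lvl "volcano" = true) :
    ((31 : Int), "volcano") ∈ pvHitsB lvl := by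
  have h2 := pv_pre lvl "volcano" 7 (by decide)
  rw [h] at h2
  have hs := eq_of_beq h2
  simp [pvHitsB, pvPGroups, pvSGroups, PySem.Dict.get?_mk_cons, ← hs]

lemma pv_inB_32 (lvl : String)
    (h : PySem.Str.endswith lvl "_volcano.lvl" = true) :
    ((32 : Int), "volcano") ∈ pvHitsB lvl := by
  have h2 := pv_suf lvl "_volcano.lvl" 12 (by decide) (by decide)
  rw [h] at h2
  have hs := eq_of_beq h2
  simp [pvHitsB, pvPGroups, pvSGroups, PySem.Dict.get?_mk_cons, ← hs]

lemma pv_inB_33 (lvl : String)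
    (h : PySem.Str.startswith lvl "dm1" = true) :
    ((33 : Int), "cave") ∈ pvHitsB lvl := by
  have h2 := pv_pre lvl "dm1" 3 (by decide)
  rw [h] at h2
  have hs := eq_of_beq h2
  simp [pvHitsB, pvPGroups, pvSGroups, PySem.Dict.get?_mk_cons, ← hs]

lemma pv_inB_34 (lvl : String)
    (h : PySem.Str.startswith lvl "dm2" = true) :
    ((34 : Int), "jungle") ∈ pvHitsB lvl := by
  have h2 := pv_pre lvl "dm2" 3 (by decide)
  rw [h] at h2
  have hs := eq_of_beq h2
  simp [pvHitsB, pvPGroups, pvSGroups, PySem.Dict.get?_mk_cons, ← hs]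

lemma pv_inB_35 (lvl : String)
    (h : PySem.Str.startswith lvl "dm3" = true) :
    ((35 : Int), "volcano") ∈ pvHitsB lvl := by
  have h2 := pv_pre lvl "dm3" 3 (by decide)
  rw [h] at h2
  have hs := eq_of_beq h2
  simp [pvHitsB, pvPGroups, pvSGroups, PySem.Dict.get?_mk_cons, ← hs]

lemma pv_inB_36 (lvl : String)
    (h : PySem.Str.startswith lvl "dm4" = true) :
    ((36 : Int), "tidepool") ∈ pvHitsB lvl := by
  have h2 := pv_pre lvl "dm4" 3 (by decide)
  rw [h] at h2
  have hs := eq_of_beq h2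
  simp [pvHitsB, pvPGroups, pvSGroups, PySem.Dict.get?_mk_cons, ← hs]

lemma pv_inB_37 (lvl : String)
    (h : PySem.Str.startswith lvl "dm5" = true) :
    ((37 : Int), "temple") ∈ pvHitsB lvl := by
  have h2 := pv_pre lvl "dm5" 3 (by decide)
  rw [h] at h2
  have hs := eq_of_beq h2
  simp [pvHitsB, pvPGroups, pvSGroups, PySem.Dict.get?_mk_cons, ← hs]

lemma pv_inB_38 (lvl : String)
    (h : PySem.Str.startswith lvl "dm6" = true) :
    ((38 : Int), "ice") ∈ pvHitsB lvl := by
  have h2 := pv_pre lvl "dm6" 3 (by decide)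
  rw [h] at h2
  have hs := eq_of_beq h2
  simp [pvHitsB, pvPGroups, pvSGroups, PySem.Dict.get?_mk_cons, ← hs]

lemma pv_inB_39 (lvl : String)
    (h : PySem.Str.startswith lvl "dm7" = true) :
    ((39 : Int), "babylon") ∈ pvHitsB lvl := by
  have h2 := pv_pre lvl "dm7" 3 (by decide)
  rw [h] at h2
  have hs := eq_of_beq h2
  simp [pvHitsB, pvPGroups, pvSGroups, PySem.Dict.get?_mk_cons, ← hs]

lemma pv_inB_40 (lvl : String)
    (h : PySem.Str.startswith lvl "dm8" = true) :
    ((40 : Int), "sunken") ∈ pvHitsB lvl := by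
  have h2 := pv_pre lvl "dm8" 3 (by decide)
  rw [h] at h2
  have hs := eq_of_beq h2
  simp [pvHitsB, pvPGroups, pvSGroups, PySem.Dict.get?_mk_cons, ← hs]

lemma pv_inB (lvl : String) :
    ∀ r ∈ pvRules, pvTest lvl r = true → pvPay r ∈ pvHitsB lvl := by
  intro r hr ht
  fin_cases hr
  · exact pv_inB_0 lvl (by simpa [pvTest] using ht)
  · exact pv_inB_1 lvl (by simpa [pvTest] using ht)
  · exact pv_inB_2 lvl (by simpa [pvTest] using ht)
  · exact pv_inB_3 lvl (by simpa [pvTest] using ht)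
  · exact pv_inB_4 lvl (by simpa [pvTest] using ht)
  · exact pv_inB_5 lvl (by simpa [pvTest] using ht)
  · exact pv_inB_6 lvl (by simpa [pvTest] using ht)
  · exact pv_inB_7 lvl (by simpa [pvTest] using ht)
  · exact pv_inB_8 lvl (by simpa [pvTest] using ht)
  · exact pv_inB_9 lvl (by simpa [pvTest] using ht)
  · exact pv_inB_10 lvl (by simpa [pvTest] using ht)
  · exact pv_inB_11 lvl (by simpa [pvTest] using ht)
  · exact pv_inB_12 lvl (by simpa [pvTest] using ht)
  · exact pv_inB_13 lvl (by simpa [pvTest] using ht)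
  · exact pv_inB_14 lvl (by simpa [pvTest] using ht)
  · exact pv_inB_15 lvl (by simpa [pvTest] using ht)
  · exact pv_inB_16 lvl (by simpa [pvTest] using ht)
  · exact pv_inB_17 lvl (by simpa [pvTest] using ht)
  · exact pv_inB_18 lvl (by simpa [pvTest] using ht)
  · exact pv_inB_19 lvl (by simpa [pvTest] using ht)
  · exact pv_inB_20 lvl (by simpa [pvTest] using ht)
  · exact pv_inB_21 lvl (by simpa [pvTest] using ht)
  · exact pv_inB_22 lvl (by simpa [pvTest] using ht)
  · exact pv_inB_23 lvl (by simpa [pvTest] using ht)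
  · exact pv_inB_24 lvl (by simpa [pvTest] using ht)
  · exact pv_inB_25 lvl (by simpa [pvTest] using ht)
  · exact pv_inB_26 lvl (by simpa [pvTest] using ht)
  · exact pv_inB_27 lvl (by simpa [pvTest] using ht)
  · exact pv_inB_28 lvl (by simpa [pvTest] using ht)
  · exact pv_inB_29 lvl (by simpa [pvTest] using ht)
  · exact pv_inB_30 lvl (by simpa [pvTest] using ht)
  · exact pv_inB_31 lvl (by simpa [pvTest] using ht)
  · exact pv_inB_32 lvl (by simpa [pvTest] using ht)
  · exact pv_inB_33 lvl (by simpa [pvTest] using ht)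
  · exact pv_inB_34 lvl (by simpa [pvTest] using ht)
  · exact pv_inB_35 lvl (by simpa [pvTest] using ht)
  · exact pv_inB_36 lvl (by simpa [pvTest] using ht)
  · exact pv_inB_37 lvl (by simpa [pvTest] using ht)
  · exact pv_inB_38 lvl (by simpa [pvTest] using ht)
  · exact pv_inB_39 lvl (by simpa [pvTest] using ht)
  · exact pv_inB_40 lvl (by simpa [pvTest] using ht)

-- min2? as a fold with an explicit step (definitional)
def pvStep (acc : Option (Int × String)) (x : Int × String) : Option (Int × String) :=
  match acc with
  | none => some x
  | some m => if (decide (x.1 < m.1) || (!decide (m.1 < x.1) && decide (x.2 < m.2))) = true then some x else some m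

lemma pv_min2_eq (xs : List (Int × String)) :
    PySem.List.min2? xs (fun h => h.1) (fun h => h.2) = xs.foldl pvStep none := by
  simp only [PySem.List.min2?]
  congr 1
  funext acc x
  cases acc <;> rfl

lemma pv_go (xs : List (Int × String)) :
    ∀ (m : Int × String), ∃ r, xs.foldl pvStep (some m) = some r ∧ (r = m ∨ r ∈ xs) ∧
      r.1 ≤ m.1 ∧ ∀ y ∈ xs, r.1 ≤ y.1 := by
  induction xs with
  | nil => intro m; exact ⟨m, rfl, Or.inl rfl, le_refl _, by simp⟩
  | cons x t ih =>
    intro m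
    rw [List.foldl_cons]
    by_cases hc : (decide (x.1 < m.1) || (!decide (m.1 < x.1) && decide (x.2 < m.2))) = true
    · have hd : pvStep (some m) x = some x := by simp only [pvStep, hc, if_true]
      have hx1 : x.1 ≤ m.1 := by
        rcases Bool.or_eq_true_iff.mp hc with h|h
        · have := of_decide_eq_true h; omega
        · simp only [Bool.and_eq_true, Bool.not_eq_eq_eq_not, Bool.not_true,
            decide_eq_false_iff_not, decide_eq_true_eq] at h
          obtain ⟨h1, -⟩ := h
          omega
      rw [hd]
      obtain ⟨r, hfold, hmem, hle, hall⟩ := ih x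
      refine ⟨r, hfold, ?_, le_trans hle hx1, ?_⟩
      · rcases hmem with h|h
        · exact Or.inr (h ▸ List.mem_cons_self)
        · exact Or.inr (List.mem_cons_of_mem _ h)
      · intro y hy
        rcases List.mem_cons.mp hy with h|h
        · exact h ▸ hle
        · exact hall y h
    · have hd : pvStep (some m) x = some m := by simp only [pvStep, if_neg hc]
      have hm1 : m.1 ≤ x.1 := by
        have h1 : ¬ x.1 < m.1 := fun hlt => hc (by simp [hlt])
        omega
      rw [hd]
      obtain ⟨r, hfold, hmem, hle, hall⟩ := ih m
      refine ⟨r, hfold, ?_, hle, ?_⟩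
      · rcases hmem with h|h
        · exact Or.inl h
        · exact Or.inr (List.mem_cons_of_mem _ h)
      · intro y hy
        rcases List.mem_cons.mp hy with h|h
        · exact h ▸ le_trans hle hm1
        · exact hall y h

lemma pv_min2_spec (xs : List (Int × String)) (x : Int × String) (t : List (Int × String))
    (hxs : xs = x :: t) :
    ∃ r, PySem.List.min2? xs (fun h => h.1) (fun h => h.2) = some r ∧ r ∈ xs ∧
      ∀ y ∈ xs, r.1 ≤ y.1 := by
  subst hxs
  obtain ⟨r, hfold, hmem, hle, hall⟩ := pv_go t x
  refine ⟨r, ?_, ?_, ?_⟩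
  · rw [pv_min2_eq, List.foldl_cons]; exact hfold
  · rcases hmem with h|h
    · exact h ▸ List.mem_cons_self
    · exact List.mem_cons_of_mem _ h
  · intro y hy
    rcases List.mem_cons.mp hy with h|h
    · exact h ▸ hle
    · exact hall y h

-- priorities strictly increase along pvRules
lemma pv_pairwise : pvRules.Pairwise (fun a b => a.2.2.1 < b.2.2.1) := by decide

-- ===== VERDICT (by name: the statement is the Claim_ definition above) =====
theorem get_biome_for_level_spec : Claim_equal_get_biome_for_level := by
  intro lvl _
  unfold Spec_get_biome_for_level
  rw [pvA_bridge, pvB_bridge]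
  cases hf : pvRules.find? (pvTest lvl) with
  | none =>
    have hnone := List.find?_eq_none.mp hf
    have hempty : pvHitsB lvl = [] := by
      rw [List.eq_nil_iff_forall_not_mem]
      intro h hm
      obtain ⟨r, hr, ht, _⟩ := pv_hits_sound lvl h hm
      exact hnone r hr ht
    rw [hempty]
    rfl
  | some r =>
    obtain ⟨htest, as, bs, hsplit, hfail⟩ := List.find?_eq_some_iff_append.mp hf
    have hrmem : r ∈ pvRules := by rw [hsplit]; simp
    have hin : pvPay r ∈ pvHitsB lvl := pv_inB lvl r hrmem htest
    obtain ⟨x, t, hxs⟩ : ∃ x t, pvHitsB lvl = x :: t := by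
      cases h : pvHitsB lvl with
      | nil => rw [h] at hin; cases hin
      | cons a b => exact ⟨a, b, rfl⟩
    obtain ⟨mres, hmin, hmm, hall⟩ := pv_min2_spec (pvHitsB lvl) x t hxs
    obtain ⟨r', hr'mem, hr'test, hpayeq⟩ := pv_hits_sound lvl mres hmm
    have hle : mres.1 ≤ r.2.2.1 := hall _ hin
    have hr'r : r' = r := by
      rw [hsplit] at hr'mem
      rcases List.mem_append.mp hr'mem with h|h
      · exact absurd hr'test (by simpa using hfail r' h)
      · rcases List.mem_cons.mp h with h|h
        · exact h
        · exfalso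
          have hpw := pv_pairwise
          rw [hsplit] at hpw
          have hlt : r.2.2.1 < r'.2.2.1 :=
            (List.pairwise_cons.mp (List.pairwise_append.mp hpw).2.1).1 r' h
          have hmr : mres.1 = r'.2.2.1 := by rw [hpayeq]; rfl
          omega
    rw [hmin, hpayeq, hr'r]
    simp [pvPay]
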